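-- pv_equiv track=rewrite | github.com/CIA-Oceanix/GeoTrackNet | contrario_utils.py | nonzero_segments
-- ===== SOURCE A (Python) =====
-- def nonzero_segments(x_):
--     """Return list of consecutive nonzeros from x_"""
--     run = []
--     result = []
--     for d_i in range(len(x_)):
--         if x_[d_i] != 0:
--             run.append(d_i)
--         else:
--             if len(run) != 0:
--                 result.append(run)
--                 run = []
--     if len(run) != 0:
--         result.append(run)
--         run = []
--     return result
-- ===== SOURCE B (Python) =====
-- def nonzero_segments(x_):
--     """Return list of consecutive nonzeros from x_"""
--     idxs = [i for i, v in enumerate(x_) if v != 0]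
--     result = []
--     for i in idxs:
--         if result and result[-1][-1] == i - 1:
--             result[-1].append(i)
--         else:
--             result.append([i])
--     return result
-- ===== Notes on version B (the rewrite author's own statement) =====
-- stated objective: alternative
-- what changed: replaces the run-accumulator/else-flush/trailing-flush state machine with a two-phase traversal: first collect all nonzero indices, then split that index list into runs wherever consecutive indices jump by more than one
import Mathlib
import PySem

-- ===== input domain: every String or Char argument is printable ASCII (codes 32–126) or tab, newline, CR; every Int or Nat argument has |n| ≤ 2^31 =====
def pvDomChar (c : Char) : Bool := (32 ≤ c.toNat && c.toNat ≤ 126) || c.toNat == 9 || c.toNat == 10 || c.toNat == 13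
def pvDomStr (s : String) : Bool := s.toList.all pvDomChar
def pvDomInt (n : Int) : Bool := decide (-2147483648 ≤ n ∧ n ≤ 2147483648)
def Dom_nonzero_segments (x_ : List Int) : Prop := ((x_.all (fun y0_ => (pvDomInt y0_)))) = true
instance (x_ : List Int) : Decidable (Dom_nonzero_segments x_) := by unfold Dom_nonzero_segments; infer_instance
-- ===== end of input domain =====

-- B replaces A's run-accumulator/flush state machine by a two-phase traversal (collect
-- nonzero indices, then split at gaps); same cost, alternative decomposition. A is total.

-- ===== PORT A =====
-- literal port of A: for d_i in range(len(x_)) with state (run, result); trailing flush after the loop.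
-- x_[d_i] is pyGetD (indices produced by range(len(x_)) are always in range, so the default is never read).
def nonzero_segments (x_ : List Int) : List (List Int) :=
  let s := (PySem.List.pyRange 0 (x_.length : Int) 1).foldl
    (fun (st : List Int × List (List Int)) d_i =>
      if PySem.List.pyGetD x_ d_i 0 ≠ 0 then (st.1 ++ [d_i], st.2)
      else if st.1.length ≠ 0 then ([], st.2 ++ [st.1]) else st)
    ([], [])
  if s.1.length ≠ 0 then s.2 ++ [s.1] else s.2

-- ===== PORT B =====
-- literal port of Source B: filter the enumerated indices, then fold splitting at gaps.
-- `result and result[-1][-1] == i - 1` is the nested getLast? match (every stored group is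
-- nonempty, so the inner `none` branch is exact); `result[-1].append(i)` is dropLast ++ [last ++ [i]].
def nonzero_segments_alt (x_ : List Int) : List (List Int) :=
  let idxs := (PySem.List.enumerate x_).filterMap (fun p => if p.2 ≠ 0 then some p.1 else none)
  idxs.foldl
    (fun (result : List (List Int)) i =>
      match result.getLast? with
      | none => result ++ [[i]]
      | some last =>
        match last.getLast? with
        | none => result ++ [[i]]
        | some l => if l = i - 1 then result.dropLast ++ [last ++ [i]] else result ++ [[i]])
    []

-- ===== PRECONDITION & SPEC =====
def Spec_nonzero_segments (x_ : List Int) (out : List (List Int)) : Prop := out = nonzero_segments_alt x_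
instance (x_ : List Int) (out : List (List Int)) : Decidable (Spec_nonzero_segments x_ out) := by unfold Spec_nonzero_segments; infer_instance

-- ===== CLAIM (what is proved, stated in full; the proofs are below) =====
def Claim_equal_nonzero_segments : Prop := ∀ (x_ : List Int), Dom_nonzero_segments x_ → Spec_nonzero_segments x_ (nonzero_segments x_)

-- ===== LEMMAS AND PROOFS =====

-- A's index loop `for d_i in range(len(x_)): … x_[d_i] …` rewritten as a fold over the
-- enumerated suffix (the loop body sees the index and the element; generic in the body F).
theorem pv_fold_index_enum {σ : Type} (F : σ → Int → Int → σ) (x_ : List Int) :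
    ∀ (suf pre : List Int) (st : σ), x_ = pre ++ suf →
      (PySem.List.pyRange (pre.length : Int) (x_.length : Int) 1).foldl
          (fun s i => F s i (PySem.List.pyGetD x_ i 0)) st
        = (PySem.List.enumerate suf (pre.length : Int)).foldl (fun s p => F s p.1 p.2) st := by
  intro suf
  induction suf with
  | nil =>
    intro pre st h
    subst h
    rw [PySem.List.pyRange_one_eq_nil (by simp)]
    simp [PySem.List.enumerate_nil]
  | cons v t ih =>
    intro pre st h
    have hlen : (pre.length : Int) < ((pre ++ v :: t).length : Int) := by
      simp
    subst h
    rw [PySem.List.pyRange_one_cons hlen, PySem.List.enumerate_cons]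
    simp only [List.foldl_cons]
    have hget : PySem.List.pyGetD (pre ++ v :: t) (pre.length : Int) 0 = v := by
      rw [PySem.List.pyGetD_natCast]
      simp [List.getD]
    rw [hget]
    have := ih (pre ++ [v]) (F st (pre.length : Int) v) (by simp)
    simpa [List.length_append] using this

-- Main invariant: running A's loop (with its trailing flush) from state (run, rA) over the
-- elements enumerated from a equals running B's gap-splitting fold from rB, provided
-- (1) rB is rA with the pending run appended (if any), (2) a pending run ends at index a-1,
-- (3) with no pending run, the last stored index is strictly below a-1.
theorem pv_main :
    ∀ (xs : List Int) (a : Int) (run : List Int) (rA rB : List (List Int)),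
      rB = (if run = [] then rA else rA ++ [run]) →
      (∀ h : run ≠ [], run.getLast h = a - 1) →
      (run = [] → ∀ last l, rA.getLast? = some last → last.getLast? = some l → l < a - 1) →
      (let s := (PySem.List.enumerate xs a).foldl
          (fun (st : List Int × List (List Int)) p =>
            if p.2 ≠ 0 then (st.1 ++ [p.1], st.2)
            else if st.1.length ≠ 0 then ([], st.2 ++ [st.1]) else st) (run, rA);
        if s.1.length ≠ 0 then s.2 ++ [s.1] else s.2)
      = ((PySem.List.enumerate xs a).filterMap (fun p => if p.2 ≠ 0 then some p.1 else none)).foldl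
          (fun (result : List (List Int)) i =>
            match result.getLast? with
            | none => result ++ [[i]]
            | some last =>
              match last.getLast? with
              | none => result ++ [[i]]
              | some l => if l = i - 1 then result.dropLast ++ [last ++ [i]] else result ++ [[i]])
          rB := by
  intro xs
  induction xs with
  | nil =>
    intro a run rA rB h1 h2 h3
    simp only [PySem.List.enumerate_nil, List.foldl_nil, List.filterMap_nil]
    by_cases hr : run = []
    · simp [hr, h1]
    · have : run.length ≠ 0 := by simpa [List.length_eq_zero_iff] using hr
      simp [this, h1, hr]
  | cons v t ih =>
    intro a run rA rB h1 h2 h3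
    rw [PySem.List.enumerate_cons]
    simp only [List.foldl_cons, List.filterMap_cons]
    by_cases hv : v ≠ 0
    · simp only [if_pos hv]
      by_cases hr : run = []
      · -- start a fresh run [a]; B appends a new group [[a]]
        subst hr
        have hrb0 : rB = rA := by simpa using h1
        have hB : (fun (result : List (List Int)) i =>
            match result.getLast? with
            | none => result ++ [[i]]
            | some last =>
              match last.getLast? with
              | none => result ++ [[i]]
              | some l => if l = i - 1 then result.dropLast ++ [last ++ [i]] else result ++ [[i]])
            rB a = rA ++ [[a]] := by
          rcases hlast : rA.getLast? with _ | last
          · simp [hrb0, hlast]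
          · rcases hl : last.getLast? with _ | l
            · simp [hrb0, hlast, hl]
            · have hlt := h3 rfl last l hlast hl
              simp [hrb0, hlast, hl, show ¬ l = a - 1 by omega]
        simp only [List.foldl_cons, hB]
        exact ih (a + 1) [a] rA (rA ++ [[a]]) (by simp) (by intro _; simp) (by simp)
      · -- extend the pending run; B extends its last group
        have hrb : rB = rA ++ [run] := by simp [h1, hr]
        have hlastrun : run.getLast? = some (a - 1) := by
          rw [List.getLast?_eq_some_getLast hr, h2 hr]
        have hB : (fun (result : List (List Int)) i =>
            match result.getLast? with
            | none => result ++ [[i]]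
            | some last =>
              match last.getLast? with
              | none => result ++ [[i]]
              | some l => if l = i - 1 then result.dropLast ++ [last ++ [i]] else result ++ [[i]])
            rB a = rA ++ [run ++ [a]] := by
          simp [hrb, hlastrun]
        simp only [List.foldl_cons, hB]
        exact ih (a + 1) (run ++ [a]) rA (rA ++ [run ++ [a]]) (by simp) (by intro _; simp) (by simp)
    · -- zero element: A flushes (or keeps empty run); B skips the index
      simp only [if_neg hv]
      by_cases hr : run = []
      · subst hr
        simp only [List.length_nil, ne_eq, not_true_eq_false, if_false]
        refine ih (a + 1) [] rA rB (by simpa using h1) (by intro h; exact absurd rfl h) ?_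
        intro _ last l hlast hl
        have := h3 rfl last l hlast hl
        omega
      · have hlen : run.length ≠ 0 := by simpa [List.length_eq_zero_iff] using hr
        simp only [if_pos hlen]
        refine ih (a + 1) [] (rA ++ [run]) rB (by simp [h1, hr]) (by intro h; exact absurd rfl h) ?_
        intro _ last l hlast hl
        have hlast' : run = last := by simpa using hlast
        subst hlast'
        rw [List.getLast?_eq_some_getLast hr, h2 hr] at hl
        have : a - 1 = l := by simpa using hl
        omega

-- ===== VERDICT (by name: the statement is the Claim_ definition above) =====
theorem nonzero_segments_spec : Claim_equal_nonzero_segments := by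
  intro x_ _
  unfold Spec_nonzero_segments nonzero_segments nonzero_segments_alt
  have h := pv_fold_index_enum
    (fun (st : List Int × List (List Int)) i v =>
      if v ≠ 0 then (st.1 ++ [i], st.2)
      else if st.1.length ≠ 0 then ([], st.2 ++ [st.1]) else st)
    x_ x_ [] (([] : List Int), ([] : List (List Int))) (by simp)
  simp only [List.length_nil, Nat.cast_zero] at h
  rw [h]
  exact pv_main x_ 0 [] [] [] (by simp) (by intro h; exact absurd rfl h) (by simp)
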